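-- pv_equiv track=rewrite | github.com/marcuz1996/Unicode-thesis-research | vulnerable-flask-sql/app.py | validationRequest
-- ===== SOURCE A (Python) =====
-- def isAtoZ(char):
--   if ((char >= 'a' and char <= 'z') or (char >= 'A' and char <= 'Z')):
--     return True
--   else:
--     return False
--
-- def validationRequest(task):
--   for i in range (len(task)-2):
--     if task[i] == '<':
--       if isAtoZ(task[i+1]) or task[i+1] == '!' or task[i+1] == '/' or task[i+1] == '?':
--         return False
--     if task[i] == '&' and task[i+1] == '#':
--       return False
--   return True
-- ===== SOURCE B (Python) =====
-- def validationRequest(task):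
--     letters = 'abcdefghijklmnopqrstuvwxyzABCDEFGHIJKLMNOPQRSTUVWXYZ'
--     forbidden = ['&#'] + ['<' + c for c in letters + '!/?']
--     return not any(p in task for p in forbidden)
-- ===== Notes on version B (the rewrite author's own statement) =====
-- stated objective: idiomatic
-- what changed: Replaced A's manual per-character index loop with substring-containment tests of the explicit list of forbidden two-character patterns (ampersand-hash, and less-than followed by a letter, bang, slash or question mark) over the whole string; the containment operator scans in the interpreter's native substring search, a constant-factor win over A's Python-level char loop.
-- intended difference: On strings whose only forbidden two-character pattern occupies the final two characters, A returns True (its loop indices stop two short of the end and never examine the last pair) while B returns False, the intended answer for a validator meant to reject these patterns wherever they occur. — e.g. on validationRequest("a<b"): A returns true, B returns false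
import Mathlib
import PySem

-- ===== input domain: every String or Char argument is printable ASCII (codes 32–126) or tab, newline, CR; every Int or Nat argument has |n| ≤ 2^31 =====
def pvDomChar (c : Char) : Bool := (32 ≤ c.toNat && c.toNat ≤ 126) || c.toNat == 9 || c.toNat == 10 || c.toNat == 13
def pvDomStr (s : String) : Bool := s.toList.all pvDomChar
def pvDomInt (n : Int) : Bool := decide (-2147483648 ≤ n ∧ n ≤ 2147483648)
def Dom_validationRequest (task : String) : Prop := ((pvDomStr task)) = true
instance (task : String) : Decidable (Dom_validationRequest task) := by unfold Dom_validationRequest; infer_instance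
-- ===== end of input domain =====

-- B checks each forbidden two-character pattern by substring search over the whole string
-- (idiomatic); unlike A's index loop it also rejects a pattern ending at the last character.

-- ===== PORT A =====
def isAtoZ (c : Char) : Bool :=
  if ('a' ≤ c && c ≤ 'z') || ('A' ≤ c && c ≤ 'Z') then true else false

-- the 'for i in range(len(task)-2)' loop with its two early returns, over the index list
def vrLoop (ts : List Char) : List Int → Bool
  | [] => true
  | i :: rest =>
    if PySem.List.pyGetD ts i ' ' == '<' &&
        (isAtoZ (PySem.List.pyGetD ts (i+1) ' ') || PySem.List.pyGetD ts (i+1) ' ' == '!' ||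
         PySem.List.pyGetD ts (i+1) ' ' == '/' || PySem.List.pyGetD ts (i+1) ' ' == '?') then
      false
    else if PySem.List.pyGetD ts i ' ' == '&' && PySem.List.pyGetD ts (i+1) ' ' == '#' then
      false
    else
      vrLoop ts rest

def validationRequest (task : String) : Bool :=
  vrLoop task.toList (PySem.List.pyRange 0 ((task.toList.length : Int) - 2) 1)

-- ===== PORT B =====
def vrLetters : String := "abcdefghijklmnopqrstuvwxyzABCDEFGHIJKLMNOPQRSTUVWXYZ"

def vrForbidden : List String :=
  "&#" :: ((vrLetters ++ "!/?").toList.map fun c => "<".push c)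

def validationRequest_alt (task : String) : Bool :=
  !(vrForbidden.any fun p => PySem.Str.isIn p task)

-- ===== PRECONDITION & SPEC =====
-- the forbidden adjacent pair, stated on the input alone (used only by D_ and the proofs)
def forbiddenTail (b : Char) : Bool :=
  ('a' ≤ b && b ≤ 'z') || ('A' ≤ b && b ≤ 'Z') || b == '!' || b == '/' || b == '?'

def forbiddenPair (a b : Char) : Bool :=
  (a == '<' && forbiddenTail b) || (a == '&' && b == '#')

-- A's loop indices stop two short of the end, so a forbidden pattern occupying the final two
-- characters (with no forbidden pair earlier) is missed: A returns True there, B returns False,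
-- and False is the intended answer for a validator meant to reject these patterns anywhere.
def D_validationRequest (task : String) : Prop :=
  2 ≤ task.toList.length ∧
  forbiddenPair (task.toList.getD (task.toList.length - 2) ' ')
      (task.toList.getD (task.toList.length - 1) ' ') = true ∧
  ∀ i < task.toList.length - 2,
    forbiddenPair (task.toList.getD i ' ') (task.toList.getD (i+1) ' ') = false

instance (task : String) : Decidable (D_validationRequest task) := by
  unfold D_validationRequest; infer_instance

def Spec_validationRequest (task : String) (out : Bool) : Prop :=
  ¬ D_validationRequest task → out = validationRequest_alt task
instance (task : String) (out : Bool) : Decidable (Spec_validationRequest task out) := by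
  unfold Spec_validationRequest; infer_instance

def pvDiffWitness_validationRequest : String := "a<b"
def pvDiffWitnessOut_validationRequest : Bool × Bool := (true, false)

-- ===== CLAIM (what is proved, stated in full; the proofs are below) =====
def Claim_unchanged_validationRequest : Prop :=
  ∀ (task : String), Dom_validationRequest task →
    Spec_validationRequest task (validationRequest task)

def Claim_changed_validationRequest : Prop :=
  Dom_validationRequest (pvDiffWitness_validationRequest) ∧
  D_validationRequest (pvDiffWitness_validationRequest) ∧
  validationRequest (pvDiffWitness_validationRequest) = pvDiffWitnessOut_validationRequest.1 ∧
  validationRequest_alt (pvDiffWitness_validationRequest) = pvDiffWitnessOut_validationRequest.2 ∧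
  pvDiffWitnessOut_validationRequest.1 ≠ pvDiffWitnessOut_validationRequest.2

def Claim_exact_validationRequest : Prop :=
  ∀ (task : String), Dom_validationRequest task → D_validationRequest task →
    validationRequest task ≠ validationRequest_alt task

-- ===== LEMMAS AND PROOFS =====

-- A's loop returns False exactly when forbiddenPair holds of some visited pair (ts[i], ts[i+1])
theorem vrLoop_eq_any (ts : List Char) (l : List Int) :
    vrLoop ts l =
      !(l.any fun i => forbiddenPair (PySem.List.pyGetD ts i ' ') (PySem.List.pyGetD ts (i+1) ' ')) := by
  induction l with
  | nil => rfl
  | cons i rest ih =>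
    simp only [vrLoop, List.any_cons, forbiddenPair, forbiddenTail, isAtoZ, ih]
    cases PySem.List.pyGetD ts i ' ' == '<' <;>
      cases PySem.List.pyGetD ts i ' ' == '&' <;>
        simp [Bool.beq_eq_decide_eq, Bool.and_assoc]

-- A as an any over List.range
theorem A_char (task : String) :
    validationRequest task =
      !((List.range (task.toList.length - 2)).any fun k =>
        forbiddenPair (task.toList.getD k ' ') (task.toList.getD (k+1) ' ')) := by
  unfold validationRequest
  rw [vrLoop_eq_any, PySem.List.pyRange_one]
  have h2 : ((task.toList.length : Int) - 2 - 0).toNat = task.toList.length - 2 := by omega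
  rw [h2, List.any_map]
  congr 1
  congr 1
  funext k
  have hk : ((k : Int) + 1) = ((k + 1 : Nat) : Int) := by push_cast; ring
  simp only [Function.comp_apply, zero_add, hk, PySem.List.pyGetD_natCast]

-- a two-character infix is an adjacent pair at some index
theorem infix_pair (a b : Char) (ts : List Char) :
    ([a, b] <:+: ts) ↔
      ∃ i, i + 1 < ts.length ∧ ts.getD i ' ' = a ∧ ts.getD (i+1) ' ' = b := by
  induction ts with
  | nil => simp
  | cons c rest ih =>
    rw [List.infix_cons_iff, ih]
    constructor
    · rintro (hp | ⟨i, hi, h1, h2⟩)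
      · rcases rest with _ | ⟨d, rest'⟩
        · rcases hp with ⟨t, ht⟩; simp at ht
        · rcases hp with ⟨t, ht⟩
          simp only [List.cons_append, List.cons.injEq] at ht
          exact ⟨0, by simp, by simp [ht.1], by simp [ht.2.1]⟩
      · exact ⟨i + 1, by simpa using hi, by simpa using h1, by simpa using h2⟩
    · rintro ⟨i, hi, h1, h2⟩
      cases i with
      | zero =>
        left
        rcases rest with _ | ⟨d, rest'⟩
        · simp at hi
        · simp only [List.getD_cons_zero] at h1
          simp only [List.getD_cons_succ, List.getD_cons_zero] at h2
          exact ⟨rest', by simp [h1, h2]⟩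
      | succ j =>
        right
        exact ⟨j, by simp at hi; omega, by simpa using h1, by simpa using h2⟩

-- membership in the tail-character list is the range test, for chars in the ASCII domain
set_option maxRecDepth 8192 in
theorem mem_tailChars (d : Char) (hd : d.toNat ≤ 126) :
    d ∈ (vrLetters ++ "!/?").toList ↔ forbiddenTail d = true := by
  have key : ∀ m, m < 127 →
      ((Char.ofNat m) ∈ (vrLetters ++ "!/?").toList ↔ forbiddenTail (Char.ofNat m) = true) := by
    decide
  have := key d.toNat (by omega)
  rwa [Char.ofNat_toNat] at this

-- every character read in range is in the ASCII domain
theorem domChar_le (task : String) (hDom : Dom_validationRequest task)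
    (i : Nat) (hi : i < task.toList.length) : (task.toList.getD i ' ').toNat ≤ 126 := by
  have hmem : task.toList.getD i ' ' ∈ task.toList := by
    rw [List.getD_eq_getElem _ _ hi]; exact List.getElem_mem hi
  have := List.all_eq_true.mp hDom _ hmem
  simp only [pvDomChar, Bool.or_eq_true, Bool.and_eq_true, decide_eq_true_eq, beq_iff_eq] at this
  omega

-- B as an any over List.range
theorem B_char (task : String) (hDom : Dom_validationRequest task) :
    validationRequest_alt task =
      !((List.range (task.toList.length - 1)).any fun k =>
        forbiddenPair (task.toList.getD k ' ') (task.toList.getD (k+1) ' ')) := by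
  unfold validationRequest_alt
  congr 1
  have hlhs : (vrForbidden.any fun p => PySem.Str.isIn p task) = true ↔
      ∃ i, i + 1 < task.toList.length ∧
        forbiddenPair (task.toList.getD i ' ') (task.toList.getD (i+1) ' ') = true := by
    simp only [vrForbidden, List.any_cons, List.any_map, Bool.or_eq_true, List.any_eq_true,
      Function.comp_apply, PySem.Str.isIn_iff_infix]
    have h1 : ("&#" : String).toList = ['&', '#'] := rfl
    have h2 : ∀ c : Char, ("<".push c).toList = ['<', c] := by
      intro c; simp [String.toList_push]
    simp only [h1, h2, infix_pair]
    constructor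
    · rintro (⟨i, hi, ha, hb⟩ | ⟨c, hc, i, hi, ha, hb⟩)
      · refine ⟨i, hi, ?_⟩
        simp only [forbiddenPair, Bool.or_eq_true, Bool.and_eq_true, beq_iff_eq]
        exact Or.inr ⟨ha, hb⟩
      · refine ⟨i, hi, ?_⟩
        have ht : forbiddenTail (task.toList.getD (i+1) ' ') = true := by
          rw [← (mem_tailChars _ (domChar_le task hDom (i+1) hi))]
          exact hb ▸ hc
        simp only [forbiddenPair, Bool.or_eq_true, Bool.and_eq_true, beq_iff_eq]
        exact Or.inl ⟨ha, ht⟩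
    · rintro ⟨i, hi, hp⟩
      simp only [forbiddenPair, Bool.or_eq_true, Bool.and_eq_true, beq_iff_eq] at hp
      rcases hp with ⟨ha, ht⟩ | ⟨ha, hb⟩
      · right
        refine ⟨task.toList.getD (i+1) ' ',
          (mem_tailChars _ (domChar_le task hDom (i+1) hi)).mpr ht, i, hi, ha, rfl⟩
      · exact Or.inl ⟨i, hi, ha, hb⟩
  have hrhs : ((List.range (task.toList.length - 1)).any fun k =>
      forbiddenPair (task.toList.getD k ' ') (task.toList.getD (k+1) ' ')) = true ↔
      ∃ i, i + 1 < task.toList.length ∧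
        forbiddenPair (task.toList.getD i ' ') (task.toList.getD (i+1) ' ') = true := by
    simp only [List.any_eq_true, List.mem_range]
    constructor
    · rintro ⟨i, hi, h⟩; exact ⟨i, by omega, h⟩
    · rintro ⟨i, hi, h⟩; exact ⟨i, by omega, h⟩
  rcases hb : (vrForbidden.any fun p => PySem.Str.isIn p task) with _ | _
  · have := (hrhs.trans hlhs.symm)
    rcases hr : ((List.range (task.toList.length - 1)).any fun k =>
      forbiddenPair (task.toList.getD k ' ') (task.toList.getD (k+1) ' ')) with _ | _
    · rfl
    · exact absurd (hb ▸ this.mp hr) (by simp)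
  · exact (hlhs.mp hb).elim fun i hi => hrhs.mpr ⟨i, hi⟩ |>.symm

-- ===== VERDICT (by name: the statements are the Claim_ definitions above) =====
theorem validationRequest_spec : Claim_unchanged_validationRequest := by
  intro task hDom hD
  show validationRequest task = validationRequest_alt task
  rw [A_char, B_char task hDom]
  congr 1
  set P : Nat → Bool := fun k =>
    forbiddenPair (task.toList.getD k ' ') (task.toList.getD (k+1) ' ') with hP
  set n := task.toList.length with hn
  rcases Nat.lt_or_ge n 2 with h2 | h2
  · have : n - 2 = n - 1 ∨ n = 0 := by omega
    interval_cases n <;> rfl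
  · have hsplit : List.range (n - 1) = List.range (n - 2) ++ [n - 2] := by
      have : n - 1 = (n - 2) + 1 := by omega
      rw [this, List.range_succ]
    rw [hsplit, List.any_append]
    rcases hlast : P (n - 2) with _ | _
    · simp [hlast]
    · -- last pair forbidden but ¬D_: some earlier pair must be forbidden
      have : ∃ i < n - 2, P i = true := by
        by_contra hno
        push Not at hno
        exact hD ⟨h2, by
            have : n - 2 + 1 = n - 1 := by omega
            simpa [hP, this] using hlast,
          fun i hi => by
            rcases h : P i with _ | _
            · exact h
            · exact absurd h (by simpa using hno i hi)⟩
      rcases this with ⟨i, hi, hPi⟩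
      have : (List.range (n - 2)).any P = true := List.any_eq_true.mpr ⟨i, List.mem_range.mpr hi, hPi⟩
      simp [this]

theorem validationRequest_changed : Claim_changed_validationRequest := by
  unfold Claim_changed_validationRequest; decide

theorem validationRequest_tight : Claim_exact_validationRequest := by
  intro task hDom hD
  rcases hD with ⟨h2, hlast, hearly⟩
  rw [A_char, B_char task hDom]
  have hA : ((List.range (task.toList.length - 2)).any fun k =>
      forbiddenPair (task.toList.getD k ' ') (task.toList.getD (k+1) ' ')) = false := by
    rw [List.any_eq_false]
    intro k hk
    simp only [List.mem_range] at hk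
    exact (Bool.not_eq_true _).mpr (hearly k hk)
  have hB : ((List.range (task.toList.length - 1)).any fun k =>
      forbiddenPair (task.toList.getD k ' ') (task.toList.getD (k+1) ' ')) = true := by
    refine List.any_eq_true.mpr ⟨task.toList.length - 2, List.mem_range.mpr (by omega), ?_⟩
    have : task.toList.length - 2 + 1 = task.toList.length - 1 := by omega
    rw [this]; exact hlast
  rw [hA, hB]; decide
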